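-- pv_equiv track=rewrite | github.com/saiph82/python-mini-project-01 | miniproject1story.py | tech_summary
-- ===== SOURCE A (Python) =====
-- def tech_summary(work_orders):
--
--     summary = {}
--     for wo in work_orders:
--         tech = wo["tech"]
--         status = wo["status"]
--         summary[tech] = summary.get(tech, {})
--         summary[tech][status] = summary[tech].get(status, 0) + 1
--     return summary
-- ===== SOURCE B (Python) =====
-- def tech_summary(work_orders):
--     pairs = [(wo["tech"], wo["status"]) for wo in work_orders]
--     return {t: {s: pairs.count((t, s))
--                 for (t2, s) in dict.fromkeys(pairs) if t2 == t}
--             for t in dict.fromkeys(t for t, _ in pairs)}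
-- ===== Notes on version B (the rewrite author's own statement) =====
-- stated objective: alternative
-- what changed: A interleaves nested dict updates in one pass; B first flattens work orders to a (tech,status) pair list and then builds the result declaratively as nested comprehensions over ordered dedups (dict.fromkeys) with pairs.count supplying each count.
import Mathlib
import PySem

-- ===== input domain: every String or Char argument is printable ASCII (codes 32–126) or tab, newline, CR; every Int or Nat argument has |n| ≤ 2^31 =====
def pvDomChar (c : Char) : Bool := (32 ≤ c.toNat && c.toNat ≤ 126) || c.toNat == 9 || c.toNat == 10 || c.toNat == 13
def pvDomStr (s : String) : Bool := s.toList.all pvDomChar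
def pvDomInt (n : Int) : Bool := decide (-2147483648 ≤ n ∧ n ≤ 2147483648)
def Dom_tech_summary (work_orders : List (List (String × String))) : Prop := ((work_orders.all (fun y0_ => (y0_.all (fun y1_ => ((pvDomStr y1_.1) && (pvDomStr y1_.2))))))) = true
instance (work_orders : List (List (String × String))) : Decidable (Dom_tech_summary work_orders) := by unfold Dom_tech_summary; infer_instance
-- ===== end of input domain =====

-- B computes the same per-technician status counts by a different algorithm (flat (tech,status) pair list, then ordered dedups with per-pair counts) instead of A's one-pass nested dict updates; equivalence is proved on inputs where every work order has both keys.

-- dict access wo[k] (first match in the association list; Pre_ guarantees the key is present)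
def pvGetKey (wo : List (String × String)) (k : String) : String :=
  (PySem.Dict.mk wo).getD k ""

-- ===== PORT A =====
def tech_summary (work_orders : List (List (String × String))) : List (String × List (String × Int)) :=
  let summary := work_orders.foldl (fun summary wo =>
      let tech := pvGetKey wo "tech"
      let status := pvGetKey wo "status"
      let summary := summary.insert tech (summary.getD tech PySem.Dict.empty)
      summary.insert tech ((summary.getD tech PySem.Dict.empty).insert status
        ((summary.getD tech PySem.Dict.empty).getD status 0 + 1))
    ) PySem.Dict.empty
  summary.items.map (fun p => (p.1, p.2.items))

-- ===== PORT B =====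
def tech_summary_alt (work_orders : List (List (String × String))) : List (String × List (String × Int)) :=
  let pairs := work_orders.map (fun wo => (pvGetKey wo "tech", pvGetKey wo "status"))
  (PySem.List.dedup (pairs.map (fun p => p.1))).map (fun t =>
    (t, ((PySem.List.dedup pairs).filter (fun p => p.1 == t)).map
          (fun p => (p.2, (pairs.count p : Int)))))

-- ===== PRECONDITION & SPEC =====
-- Pre_ excludes exactly the inputs where A raises KeyError (a work order missing "tech" or "status").
def Pre_tech_summary (work_orders : List (List (String × String))) : Prop :=
  (work_orders.all (fun wo => wo.any (fun p => p.1 == "tech") && wo.any (fun p => p.1 == "status"))) = true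
instance (work_orders : List (List (String × String))) : Decidable (Pre_tech_summary work_orders) := by unfold Pre_tech_summary; infer_instance

def pvWitness_tech_summary : (List (List (String × String))) :=
  [[("tech", "ann"), ("status", "open")], [("status", "done"), ("tech", "bob")]]

def Spec_tech_summary (work_orders : List (List (String × String))) (out : List (String × List (String × Int))) : Prop := out = tech_summary_alt work_orders
instance (work_orders : List (List (String × String))) (out : List (String × List (String × Int))) : Decidable (Spec_tech_summary work_orders out) := by unfold Spec_tech_summary; infer_instance

-- ===== CLAIM (what is proved, stated in full; the proofs are below) =====
def Claim_equal_tech_summary : Prop := ∀ (work_orders : List (List (String × String))), Dom_tech_summary work_orders → Pre_tech_summary work_orders → Spec_tech_summary work_orders (tech_summary work_orders)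

-- ===== LEMMAS AND PROOFS =====

lemma table_get? {ν : Type} (S : List String) (f : String → ν) (x : String) (hS : S.Nodup) :
    (PySem.Dict.mk (S.map (fun t => (t, f t)))).get? x = if x ∈ S then some (f x) else none := by
  induction S with
  | nil => simp [PySem.Dict.get?]
  | cons a S ih =>
    rw [List.map_cons, PySem.Dict.get?_mk_cons]
    by_cases hx : a = x
    · subst hx; simp
    · simp only [beq_iff_eq, hx, if_false, ih (List.Nodup.of_cons hS), List.mem_cons]
      have : ¬ x = a := fun h => hx h.symm
      simp [this]

lemma table_getD {ν : Type} (S : List String) (f : String → ν) (x : String) (d : ν) (hS : S.Nodup) :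
    (PySem.Dict.mk (S.map (fun t => (t, f t)))).getD x d = if x ∈ S then f x else d := by
  rw [PySem.Dict.getD_eq_get?_getD, table_get? S f x hS]
  split <;> rfl

lemma table_insert_mem {ν : Type} (S : List String) (f : String → ν) (t0 : String) (v : ν)
    (h : t0 ∈ S) :
    (PySem.Dict.mk (S.map (fun t => (t, f t)))).insert t0 v
      = PySem.Dict.mk (S.map (fun t => (t, if t = t0 then v else f t))) := by
  apply PySem.Dict.ext
  rw [PySem.Dict.items_insert_of_contains]
  · show (S.map (fun t => (t, f t))).map _ = _
    rw [List.map_map]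
    apply List.map_congr_left
    intro t _
    by_cases ht : t = t0
    · subst ht; simp
    · simp [ht]
  · rw [PySem.Dict.contains_eq_decide_mem_keys]
    simp [PySem.Dict.keys, h]

lemma table_insert_not_mem {ν : Type} (S : List String) (f : String → ν) (t0 : String) (v : ν)
    (h : t0 ∉ S) :
    (PySem.Dict.mk (S.map (fun t => (t, f t)))).insert t0 v
      = PySem.Dict.mk (S.map (fun t => (t, f t)) ++ [(t0, v)]) := by
  apply PySem.Dict.ext
  rw [PySem.Dict.items_insert_of_not_contains]
  rw [PySem.Dict.contains_eq_decide_mem_keys]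
  simp [PySem.Dict.keys, h]

def innerD (km : List (String × String)) (t : String) : PySem.Dict String Int :=
  PySem.Dict.mk (((PySem.List.dedup km).filter (fun p => p.1 == t)).map
    (fun p => (p.2, (km.count p : Int))))

lemma pairs_map_snd {ν : Type} (P : List (String × String)) (t0 : String) (c : String × String → ν) :
    (P.filter (fun p => p.1 == t0)).map (fun p => (p.2, c p))
      = ((P.filter (fun p => p.1 == t0)).map (fun p => p.2)).map (fun s => (s, c (t0, s))) := by
  rw [List.map_map]
  apply List.map_congr_left
  intro p hp
  have h1 : p.1 = t0 := by simpa using (List.mem_filter.mp hp).2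
  cases p; simp_all

lemma nodup_snd (P : List (String × String)) (hP : P.Nodup) (t0 : String) :
    ((P.filter (fun p => p.1 == t0)).map (fun p => p.2)).Nodup := by
  apply List.Nodup.map_on _ (hP.filter _)
  intro p hp q hq h2
  have h1 : p.1 = t0 := by simpa using (List.mem_filter.mp hp).2
  have h1' : q.1 = t0 := by simpa using (List.mem_filter.mp hq).2
  cases p; cases q; simp_all

lemma mem_snd (P : List (String × String)) (t0 s0 : String) :
    s0 ∈ (P.filter (fun p => p.1 == t0)).map (fun p => p.2) ↔ (t0, s0) ∈ P := by
  simp only [List.mem_map, List.mem_filter, beq_iff_eq]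
  constructor
  · rintro ⟨⟨a, b⟩, ⟨hm, h1⟩, h2⟩; simp at h1 h2; subst h1; subst h2; exact hm
  · intro h; exact ⟨(t0, s0), ⟨h, rfl⟩, rfl⟩

lemma inner_ne (km : List (String × String)) (t0 s0 t : String) (ht : t ≠ t0) :
    innerD (km ++ [(t0, s0)]) t = innerD km t := by
  unfold innerD
  congr 1
  simp only [PySem.List.dedup_eq_ofList, PySem.Set.ofList_append_singleton, PySem.Set.add_eq_ite]
  have hfilt : ∀ (L : List (String × String)),
      (L ++ [(t0, s0)]).filter (fun p => p.1 == t) = L.filter (fun p => p.1 == t) := by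
    intro L; rw [List.filter_append]; simp [ht.symm]
  have hcnt : ∀ L' : List (String × String),
      (L'.filter (fun p => p.1 == t)).map (fun p => (p.2, ((km ++ [(t0,s0)]).count p : Int)))
        = (L'.filter (fun p => p.1 == t)).map (fun p => (p.2, (km.count p : Int))) := by
    intro L'
    apply List.map_congr_left
    intro p hp
    have h1 : p.1 = t := by simpa using (List.mem_filter.mp hp).2
    have hne : p ≠ (t0, s0) := by intro h; rw [h] at h1; exact ht h1.symm
    rw [List.count_append]
    have hne' : ¬ (t0, s0) = p := fun h => hne h.symm
    simp [hne']
  split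
  · exact hcnt _
  · rw [hfilt, hcnt]

lemma inner_eq (km : List (String × String)) (t0 s0 : String) :
    innerD (km ++ [(t0, s0)]) t0
      = (innerD km t0).insert s0 ((innerD km t0).getD s0 0 + 1) := by
  have hSQ : (((PySem.List.dedup km).filter (fun p => p.1 == t0)).map (fun p => p.2)).Nodup :=
    nodup_snd _ (PySem.List.nodup_dedup km) t0
  have hrw : innerD km t0
      = PySem.Dict.mk ((((PySem.List.dedup km).filter (fun p => p.1 == t0)).map (fun p => p.2)).map
          (fun s => (s, (km.count (t0, s) : Int)))) := by
    unfold innerD; rw [pairs_map_snd]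
  by_cases hk : (t0, s0) ∈ km
  · have hs0 : s0 ∈ ((PySem.List.dedup km).filter (fun p => p.1 == t0)).map (fun p => p.2) :=
      (mem_snd _ _ _).mpr ((PySem.List.mem_dedup _ _).mpr hk)
    rw [hrw, table_getD _ _ _ _ hSQ, if_pos hs0, table_insert_mem _ _ _ _ hs0]
    have hded : PySem.List.dedup (km ++ [(t0, s0)]) = PySem.List.dedup km := by
      simp only [PySem.List.dedup_eq_ofList, PySem.Set.ofList_append_singleton]
      exact PySem.Set.add_of_mem ((PySem.Set.mem_ofList _ _).mpr hk)
    unfold innerD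
    rw [hded, pairs_map_snd]
    congr 1
    apply List.map_congr_left
    intro s hs
    by_cases hss : s = s0
    · subst hss
      rw [List.count_append]
      simp
    · have : ¬ (t0, s0) = (t0, s) := by intro h; exact hss (by simpa using h.symm)
      rw [List.count_append]
      simp [hss, this]
  · have hs0 : s0 ∉ ((PySem.List.dedup km).filter (fun p => p.1 == t0)).map (fun p => p.2) := by
      intro h; exact hk ((PySem.List.mem_dedup _ _).mp ((mem_snd _ _ _).mp h))
    rw [hrw, table_getD _ _ _ _ hSQ, if_neg hs0, table_insert_not_mem _ _ _ _ hs0]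
    have hded : PySem.List.dedup (km ++ [(t0, s0)]) = PySem.List.dedup km ++ [(t0, s0)] := by
      simp only [PySem.List.dedup_eq_ofList, PySem.Set.ofList_append_singleton]
      exact PySem.Set.add_of_not_mem (fun h => hk ((PySem.Set.mem_ofList _ _).mp h))
    unfold innerD
    rw [hded, List.filter_append]
    have hfk : List.filter (fun p => p.1 == t0) [(t0, s0)] = [(t0, s0)] := by simp
    rw [hfk, List.map_append, pairs_map_snd]
    congr 1
    simp only [List.map_cons, List.map_nil]
    congr 1
    · apply List.map_congr_left
      intro s hs
      rcases List.mem_map.mp hs with ⟨p, hp, hps⟩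
      have hpm : p ∈ km := (PySem.List.mem_dedup _ _).mp (List.mem_filter.mp hp).1
      have hne : ¬ (t0, s0) = (t0, s) := by
        intro h
        obtain rfl : s0 = s := by simpa using h
        have h1 : p.1 = t0 := by simpa using (List.mem_filter.mp hp).2
        have : p = (t0, s0) := by cases p; simp_all
        exact hk (this ▸ hpm)
      rw [List.count_append]
      simp [hne]
    · have hc : km.count (t0, s0) = 0 := List.count_eq_zero.mpr hk
      rw [List.count_append]
      simp [hc]

def stepA (s : PySem.Dict String (PySem.Dict String Int)) (k : String × String) :
    PySem.Dict String (PySem.Dict String Int) :=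
  let s1 := s.insert k.1 (s.getD k.1 PySem.Dict.empty)
  s1.insert k.1 ((s1.getD k.1 PySem.Dict.empty).insert k.2
    ((s1.getD k.1 PySem.Dict.empty).getD k.2 0 + 1))

def rhsFun (km : List (String × String)) : PySem.Dict String (PySem.Dict String Int) :=
  PySem.Dict.mk ((PySem.List.dedup (km.map (fun p => p.1))).map (fun t => (t, innerD km t)))

lemma stepA_eq (s : PySem.Dict String (PySem.Dict String Int)) (k : String × String) :
    stepA s k = s.insert k.1 ((s.getD k.1 PySem.Dict.empty).insert k.2
      ((s.getD k.1 PySem.Dict.empty).getD k.2 0 + 1)) := by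
  show (s.insert k.1 (s.getD k.1 PySem.Dict.empty)).insert k.1
      (((s.insert k.1 (s.getD k.1 PySem.Dict.empty)).getD k.1 PySem.Dict.empty).insert k.2
        (((s.insert k.1 (s.getD k.1 PySem.Dict.empty)).getD k.1 PySem.Dict.empty).getD k.2 0 + 1)) = _
  rw [PySem.Dict.getD_insert_self, PySem.Dict.insert_insert_self]

lemma step_rhs (km : List (String × String)) (t0 s0 : String) :
    stepA (rhsFun km) (t0, s0) = rhsFun (km ++ [(t0, s0)]) := by
  rw [stepA_eq]
  have hT : (PySem.List.dedup (km.map (fun p => p.1))).Nodup := PySem.List.nodup_dedup _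
  show (rhsFun km).insert t0
      (((rhsFun km).getD t0 PySem.Dict.empty).insert s0
        (((rhsFun km).getD t0 PySem.Dict.empty).getD s0 0 + 1)) = _
  rw [show rhsFun km = PySem.Dict.mk ((PySem.List.dedup (km.map (fun p => p.1))).map
        (fun t => (t, innerD km t))) from rfl,
      table_getD _ _ _ _ hT]
  have hmfst : (km ++ [(t0, s0)]).map (fun p => p.1) = km.map (fun p => p.1) ++ [t0] := by simp
  by_cases ht0 : t0 ∈ km.map (fun p => p.1)
  · have hmem : t0 ∈ PySem.List.dedup (km.map (fun p => p.1)) :=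
      (PySem.List.mem_dedup _ _).mpr ht0
    rw [if_pos hmem, table_insert_mem _ _ _ _ hmem]
    have hded : PySem.List.dedup ((km ++ [(t0, s0)]).map (fun p => p.1))
        = PySem.List.dedup (km.map (fun p => p.1)) := by
      rw [hmfst]
      simp only [PySem.List.dedup_eq_ofList, PySem.Set.ofList_append_singleton]
      exact PySem.Set.add_of_mem ((PySem.Set.mem_ofList _ _).mpr ht0)
    show _ = PySem.Dict.mk ((PySem.List.dedup ((km ++ [(t0, s0)]).map (fun p => p.1))).map
        (fun t => (t, innerD (km ++ [(t0, s0)]) t)))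
    rw [hded]
    congr 1
    apply List.map_congr_left
    intro t ht
    by_cases htt : t = t0
    · subst htt; rw [if_pos rfl, inner_eq]
    · rw [if_neg htt, inner_ne _ _ _ _ htt]
  · have hmem : t0 ∉ PySem.List.dedup (km.map (fun p => p.1)) :=
      fun h => ht0 ((PySem.List.mem_dedup _ _).mp h)
    have hk0 : (t0, s0) ∉ km := fun h => ht0 (List.mem_map.mpr ⟨(t0, s0), h, rfl⟩)
    rw [if_neg hmem]
    have hemp : (PySem.Dict.empty : PySem.Dict String Int).insert s0
        ((PySem.Dict.empty : PySem.Dict String Int).getD s0 0 + 1)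
        = PySem.Dict.mk [(s0, (1 : Int))] := by
      have := table_insert_not_mem ([] : List String) (fun _ => (0 : Int)) s0
        ((PySem.Dict.empty : PySem.Dict String Int).getD s0 0 + 1) (by simp)
      simpa [PySem.Dict.getD_empty] using this
    rw [hemp, table_insert_not_mem _ _ _ _ hmem]
    have hded : PySem.List.dedup ((km ++ [(t0, s0)]).map (fun p => p.1))
        = PySem.List.dedup (km.map (fun p => p.1)) ++ [t0] := by
      rw [hmfst]
      simp only [PySem.List.dedup_eq_ofList, PySem.Set.ofList_append_singleton]
      exact PySem.Set.add_of_not_mem (fun h => ht0 ((PySem.Set.mem_ofList _ _).mp h))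
    show _ = PySem.Dict.mk ((PySem.List.dedup ((km ++ [(t0, s0)]).map (fun p => p.1))).map
        (fun t => (t, innerD (km ++ [(t0, s0)]) t)))
    rw [hded, List.map_append]
    congr 1
    congr 1
    · apply List.map_congr_left
      intro t ht
      have htt : t ≠ t0 := by
        intro h; subst h; exact hmem ht
      rw [inner_ne _ _ _ _ htt]
    · simp only [List.map_cons, List.map_nil]
      have hin : innerD (km ++ [(t0, s0)]) t0 = PySem.Dict.mk [(s0, (1 : Int))] := by
        unfold innerD
        have hded2 : PySem.List.dedup (km ++ [(t0, s0)]) = PySem.List.dedup km ++ [(t0, s0)] := by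
          simp only [PySem.List.dedup_eq_ofList, PySem.Set.ofList_append_singleton]
          exact PySem.Set.add_of_not_mem (fun h => hk0 ((PySem.Set.mem_ofList _ _).mp h))
        rw [hded2, List.filter_append]
        have h1 : List.filter (fun p => p.1 == t0) (PySem.List.dedup km) = [] := by
          rw [List.filter_eq_nil_iff]
          intro p hp
          have hpm : p ∈ km := (PySem.List.mem_dedup _ _).mp hp
          have : p.1 ≠ t0 := fun h => ht0 (h ▸ List.mem_map.mpr ⟨p, hpm, rfl⟩)
          simpa using this
        have h2 : List.filter (fun p => p.1 == t0) [(t0, s0)] = [(t0, s0)] := by simp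
        rw [h1, h2, List.nil_append]
        simp [List.count_append, List.count_eq_zero.mpr hk0]
      rw [hin]

lemma foldA_eq (km : List (String × String)) :
    km.foldl stepA PySem.Dict.empty = rhsFun km := by
  induction km using List.reverseRecOn with
  | nil => rfl
  | append_singleton km k0 ih =>
    obtain ⟨t0, s0⟩ := k0
    rw [List.foldl_append, ih, List.foldl_cons, List.foldl_nil, step_rhs]

lemma main_eq (work_orders : List (List (String × String))) :
    tech_summary work_orders = tech_summary_alt work_orders := by
  unfold tech_summary tech_summary_alt
  have hb : work_orders.foldl (fun summary wo =>
      let tech := pvGetKey wo "tech"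
      let status := pvGetKey wo "status"
      let summary := summary.insert tech (summary.getD tech PySem.Dict.empty)
      summary.insert tech ((summary.getD tech PySem.Dict.empty).insert status
        ((summary.getD tech PySem.Dict.empty).getD status 0 + 1))) PySem.Dict.empty
      = (work_orders.map (fun wo => (pvGetKey wo "tech", pvGetKey wo "status"))).foldl
          stepA PySem.Dict.empty := by
    rw [List.foldl_map]
    rfl
  rw [hb, foldA_eq]
  simp only [rhsFun, innerD, List.map_map]
  rfl

-- ===== VERDICT (by name: the statement is the Claim_ definition above) =====
theorem tech_summary_spec : Claim_equal_tech_summary := by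
  intro wos _ _
  unfold Spec_tech_summary
  exact main_eq wos
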